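-- pv_equiv track=rewrite | github.com/adrielnardi/mestrado-redes | teste-rede-ryu-mininet/Controller3.py | get_route_ecmp
-- ===== SOURCE A (Python) =====
-- def get_route_ecmp(switch_in, switch_out, paths):
--     if paths:
--         hash = 0
--         for n in (switch_in + switch_out):
--             hash += ord(n)
--         choice = hash % len(paths)
--         path = sorted(paths)[choice]
--         return path
--     else:
--         return []
-- ===== SOURCE B (Python) =====
-- def get_route_ecmp(switch_in, switch_out, paths):
--     # Quickselect: find the choice-th smallest path by three-way partitioning, without sorting.
--     if not paths:
--         return []
--     k = sum(ord(c) for c in switch_in + switch_out) % len(paths)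
--     xs = paths
--     while True:
--         pivot = xs[0]
--         lt = [x for x in xs if x < pivot]
--         if k < len(lt):
--             xs = lt
--             continue
--         n_eq = sum(1 for x in xs if x == pivot)
--         if k < len(lt) + n_eq:
--             return pivot
--         k -= len(lt) + n_eq
--         xs = [x for x in xs if x > pivot]
-- ===== Notes on version B (the rewrite author's own statement) =====
-- stated objective: alternative
-- what changed: Replaces sorting the whole path list and indexing into it by a three-way-partition quickselect that finds only the choice-th smallest path.
import Mathlib
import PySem

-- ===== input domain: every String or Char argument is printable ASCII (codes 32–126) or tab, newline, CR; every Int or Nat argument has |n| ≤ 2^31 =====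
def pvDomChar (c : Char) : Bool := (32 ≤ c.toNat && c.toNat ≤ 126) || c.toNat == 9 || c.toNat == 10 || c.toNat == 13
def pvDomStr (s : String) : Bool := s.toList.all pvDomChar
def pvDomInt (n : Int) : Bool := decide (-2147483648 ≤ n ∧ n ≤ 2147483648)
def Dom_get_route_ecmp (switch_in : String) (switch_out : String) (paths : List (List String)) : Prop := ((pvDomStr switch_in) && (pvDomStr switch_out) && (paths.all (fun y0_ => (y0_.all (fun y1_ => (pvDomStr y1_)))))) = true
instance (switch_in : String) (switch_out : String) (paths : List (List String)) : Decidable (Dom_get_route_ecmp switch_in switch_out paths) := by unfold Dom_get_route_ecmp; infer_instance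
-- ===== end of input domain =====

-- B replaces A's full sort + index by a quickselect of the choice-th smallest path (alternative selection algorithm).


-- ===== PORT A =====
def get_route_ecmp (switch_in : String) (switch_out : String) (paths : List (List String)) : List String :=
  if paths = [] then []
  else
    -- hash = 0; for n in (switch_in + switch_out): hash += ord(n)
    let hash : Int := ((switch_in ++ switch_out).toList).foldl (fun h c => h + (c.toNat : Int)) 0
    let choice : Int := PySem.Int.mod hash (paths.length : Int)
    PySem.List.pyGetD (PySem.List.sorted paths (fun x => x) false) choice []

-- ===== PORT B =====
-- quickselect: the k-th smallest element of xs (Python's list-of-str comparison is Lean's `<` on List String)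
def pvQsel : List (List String) → Nat → List String
  | [], _ => []
  | p :: rest, k =>
    let xs := p :: rest
    let lt := xs.filter (fun x => decide (x < p))
    if k < lt.length then pvQsel lt k
    else
      let nEq := (xs.filter (fun x => decide (x = p))).length
      if k < lt.length + nEq then p
      else pvQsel (xs.filter (fun x => decide (p < x))) (k - (lt.length + nEq))
termination_by xs _ => xs.length
decreasing_by
  · exact List.length_filter_lt_length_iff_exists.mpr ⟨p, List.mem_cons_self, by simp⟩
  · exact List.length_filter_lt_length_iff_exists.mpr ⟨p, List.mem_cons_self, by simp⟩


def get_route_ecmp_alt (switch_in : String) (switch_out : String) (paths : List (List String)) : List String :=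
  if paths = [] then []
  else
    -- k = sum(ord(c) for c in switch_in + switch_out) % len(paths)
    let s : Int := (((switch_in ++ switch_out).toList).map (fun c => (c.toNat : Int))).sum
    let k : Int := PySem.Int.mod s (paths.length : Int)
    pvQsel paths k.toNat

-- ===== PRECONDITION & SPEC =====
def Spec_get_route_ecmp (switch_in : String) (switch_out : String) (paths : List (List String)) (out : List String) : Prop := out = get_route_ecmp_alt switch_in switch_out paths
instance (switch_in : String) (switch_out : String) (paths : List (List String)) (out : List String) : Decidable (Spec_get_route_ecmp switch_in switch_out paths out) := by unfold Spec_get_route_ecmp; infer_instance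

-- ===== CLAIM (what is proved, stated in full; the proofs are below) =====
def Claim_equal_get_route_ecmp : Prop := ∀ (switch_in : String) (switch_out : String) (paths : List (List String)), Dom_get_route_ecmp switch_in switch_out paths → Spec_get_route_ecmp switch_in switch_out paths (get_route_ecmp switch_in switch_out paths)

-- ===== LEMMAS AND PROOFS =====

-- the three-way pivot partition is a permutation of the list
lemma pvPartition_perm (xs : List (List String)) (p : List String) :
    (xs.filter (fun x => decide (x < p)) ++ xs.filter (fun x => decide (x = p)) ++
      xs.filter (fun x => decide (p < x))).Perm xs := by
  induction xs with
  | nil => simp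
  | cons a t ih =>
    rcases lt_trichotomy a p with h | h | h
    · simpa [List.filter_cons, h, not_lt_of_gt h, ne_of_lt h] using ih.cons a
    · subst h
      simp only [List.filter_cons, lt_irrefl, decide_false, Bool.false_eq_true, if_neg,
        decide_true, if_pos, not_false_eq_true]
      rw [List.append_assoc, List.cons_append]
      exact List.perm_middle.trans (by simpa [List.append_assoc] using ih.cons a)
    · simp only [List.filter_cons, not_lt_of_gt h, (ne_of_lt h).symm, decide_false, h,
        decide_true, if_pos, Bool.false_eq_true, if_neg, not_false_eq_true]
      exact List.perm_middle.trans (ih.cons a)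


-- the core `decide`-instance for < on List String equals the LinearOrder one
lemma pvDecLT_eq : (fun (a b : List String) => a.decidableLT b) = (inferInstance : LinearOrder (List String)).toDecidableLT := by
  funext a b; exact Subsingleton.elim _ _

-- sorted_id_eq_of_perm_of_pairwise / sorted_pairwise, restated at the core List-order instances the ports elaborate with

-- PySem.List.sorted_id_eq_of_perm_of_pairwise, restated at the core list-order instances the ports elaborate with
lemma pvSortedLO (xs ys : List (List String)) (hp : ys.Perm xs) (hpw : ys.Pairwise (· ≤ ·)) :
    PySem.List.sorted xs (fun x => x) false = ys := by
  rw [pvDecLT_eq]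
  exact PySem.List.sorted_id_eq_of_perm_of_pairwise xs ys hp hpw


-- PySem.List.sorted_pairwise at the core instances
lemma pvSortedPW (xs : List (List String)) :
    (PySem.List.sorted xs (fun x => x) false).Pairwise (· ≤ ·) := by
  rw [pvDecLT_eq]
  exact PySem.List.sorted_pairwise xs (fun x => x)


-- sorting splits over the three-way pivot partition
lemma pvSorted_partition (xs : List (List String)) (p : List String)
    (hperm : (xs.filter (fun x => decide (x < p)) ++ xs.filter (fun x => decide (x = p)) ++
      xs.filter (fun x => decide (p < x))).Perm xs) :
    PySem.List.sorted xs (fun x => x) false =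
      PySem.List.sorted (xs.filter (fun x => decide (x < p))) (fun x => x) false ++
      xs.filter (fun x => decide (x = p)) ++
      PySem.List.sorted (xs.filter (fun x => decide (p < x))) (fun x => x) false := by
  apply pvSortedLO
  · exact (((PySem.List.sorted_perm _ _ _).append (List.Perm.refl _)).append
      (PySem.List.sorted_perm _ _ _)).trans hperm
  · have hlt : ∀ x ∈ PySem.List.sorted (xs.filter (fun x => decide (x < p))) (fun x => x) false, x < p := by
      intro x hx
      have := (PySem.List.mem_sorted _ _ _ _).mp hx
      simpa using (List.mem_filter.mp this).2
    have heq : ∀ x ∈ xs.filter (fun x => decide (x = p)), x = p := by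
      intro x hx; simpa using (List.mem_filter.mp hx).2
    have hgt : ∀ x ∈ PySem.List.sorted (xs.filter (fun x => decide (p < x))) (fun x => x) false, p < x := by
      intro x hx
      have := (PySem.List.mem_sorted _ _ _ _).mp hx
      simpa using (List.mem_filter.mp this).2
    rw [List.pairwise_append, List.pairwise_append]
    refine ⟨⟨pvSortedPW _, List.pairwise_of_forall_mem_list
        (fun a ha b hb => le_of_eq ((heq a ha).trans (heq b hb).symm)), ?_⟩, pvSortedPW _, ?_⟩
    · intro a ha b hb
      exact le_of_lt (lt_of_lt_of_le (hlt a ha) (le_of_eq (heq b hb).symm))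
    · intro a ha b hb
      rcases List.mem_append.mp ha with ha | ha
      · exact le_of_lt ((hlt a ha).trans (hgt b hb))
      · exact le_of_lt (lt_of_le_of_lt (le_of_eq (heq a ha)) (hgt b hb))

-- quickselect returns the k-th element of the sorted list
lemma pvQsel_eq_sorted (xs0 : List (List String)) (k : Nat) (hk : k < xs0.length) :
    pvQsel xs0 k = (PySem.List.sorted xs0 (fun x => x) false).getD k [] := by
  induction xs0, k using pvQsel.induct with
  | case1 k => simp at hk
  | case2 p rest k xs lt h ih =>
    have hxs : xs = p :: rest := rfl
    have hltv : lt = (p :: rest).filter (fun x => decide (x < p)) := rfl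
    clear_value xs lt
    subst hltv hxs
    have hsp := pvSorted_partition (p :: rest) p (pvPartition_perm (p :: rest) p)
    have hstep : pvQsel (p :: rest) k = pvQsel ((p :: rest).filter (fun x => decide (x < p))) k := by
      simp only [pvQsel, if_pos h]
    have hlen : (PySem.List.sorted ((p :: rest).filter (fun x => decide (x < p))) (fun x => x) false).length
        = ((p :: rest).filter (fun x => decide (x < p))).length := PySem.List.length_sorted _ _ _
    rw [hstep, hsp,
      List.getD_append _ _ _ _ (by simp only [List.length_append, hlen]; omega),
      List.getD_append _ _ _ _ (by rw [hlen]; exact h)]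
    exact ih h
  | case3 p rest k xs lt h nEq h2 =>
    have hxs : xs = p :: rest := rfl
    have hltv : lt = (p :: rest).filter (fun x => decide (x < p)) := rfl
    have hnv : nEq = ((p :: rest).filter (fun x => decide (x = p))).length := rfl
    clear_value xs lt nEq
    subst hnv hltv hxs
    have hsp := pvSorted_partition (p :: rest) p (pvPartition_perm (p :: rest) p)
    have hstep : pvQsel (p :: rest) k = p := by
      simp only [pvQsel, if_neg h, if_pos h2]
    have hlen : (PySem.List.sorted ((p :: rest).filter (fun x => decide (x < p))) (fun x => x) false).length
        = ((p :: rest).filter (fun x => decide (x < p))).length := PySem.List.length_sorted _ _ _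
    rw [hstep, hsp,
      List.getD_append _ _ _ _ (by simp only [List.length_append, hlen]; omega),
      List.getD_append_right _ _ _ _ (by rw [hlen]; omega),
      List.getD_eq_getElem _ _ (by rw [hlen]; omega)]
    have hm := List.getElem_mem (l := (p :: rest).filter (fun x => decide (x = p)))
      (n := k - (PySem.List.sorted ((p :: rest).filter (fun x => decide (x < p))) (fun x => x) false).length)
      (by rw [hlen]; omega)
    have hpm := (List.mem_filter.mp hm).2
    simp only [decide_eq_true_eq] at hpm
    exact hpm.symm
  | case4 p rest k xs lt h nEq h2 ih =>
    have hxs : xs = p :: rest := rfl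
    have hltv : lt = (p :: rest).filter (fun x => decide (x < p)) := rfl
    have hnv : nEq = ((p :: rest).filter (fun x => decide (x = p))).length := rfl
    clear_value xs lt nEq
    subst hnv hltv hxs
    have hperm := pvPartition_perm (p :: rest) p
    have hsp := pvSorted_partition (p :: rest) p hperm
    have hstep : pvQsel (p :: rest) k = pvQsel ((p :: rest).filter (fun x => decide (p < x)))
        (k - (((p :: rest).filter (fun x => decide (x < p))).length + ((p :: rest).filter (fun x => decide (x = p))).length)) := by
      simp only [pvQsel, if_neg h, if_neg h2]
    have hlen : (PySem.List.sorted ((p :: rest).filter (fun x => decide (x < p))) (fun x => x) false).length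
        = ((p :: rest).filter (fun x => decide (x < p))).length := PySem.List.length_sorted _ _ _
    have htot : ((p :: rest).filter (fun x => decide (x < p))).length
        + ((p :: rest).filter (fun x => decide (x = p))).length
        + ((p :: rest).filter (fun x => decide (p < x))).length = (p :: rest).length := by
      have := hperm.length_eq
      simp only [List.length_append] at this
      omega
    have hk' : k - (((p :: rest).filter (fun x => decide (x < p))).length
        + ((p :: rest).filter (fun x => decide (x = p))).length)
        < ((p :: rest).filter (fun x => decide (p < x))).length := by omega
    rw [hstep, hsp,
      List.getD_append_right _ _ _ _ (by simp only [List.length_append, hlen]; omega),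
      ih hk']
    congr 1
    simp only [List.length_append, hlen]

-- ===== VERDICT (by name: the statement is the Claim_ definition above) =====
theorem get_route_ecmp_spec : Claim_equal_get_route_ecmp := by
  intro switch_in switch_out paths _
  unfold Spec_get_route_ecmp
  show get_route_ecmp switch_in switch_out paths = get_route_ecmp_alt switch_in switch_out paths
  unfold get_route_ecmp get_route_ecmp_alt
  by_cases hp : paths = []
  · simp [hp]
  · rw [if_neg hp, if_neg hp]
    have hsum : ((switch_in ++ switch_out).toList).foldl (fun h c => h + (c.toNat : Int)) 0
        = (((switch_in ++ switch_out).toList).map (fun c => (c.toNat : Int))).sum := by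
      rw [List.sum_eq_foldl, List.foldl_map]
    have hlen : 0 < paths.length := List.length_pos_iff.mpr hp
    rw [hsum]
    set ch : Int := PySem.Int.mod ((((switch_in ++ switch_out).toList).map (fun c => (c.toNat : Int))).sum) (paths.length : Int) with hch
    have h0 : 0 ≤ ch := PySem.Int.mod_nonneg _ (by exact_mod_cast hlen)
    have h1 : ch < (paths.length : Int) := PySem.Int.mod_lt _ (by exact_mod_cast hlen)
    have hk : ch.toNat < paths.length := by omega
    rw [PySem.List.pyGetD_eq_getElem _ _ h0 (by rw [PySem.List.length_sorted]; exact_mod_cast h1),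
      pvQsel_eq_sorted paths ch.toNat hk,
      List.getD_eq_getElem _ _ (by rw [PySem.List.length_sorted]; exact hk)]
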